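-- pv_equiv track=rewrite | github.com/EugenHotaj/Advent-of-Code-2018 | day2/part1.py | check
-- ===== SOURCE A (Python) =====
-- def check(line):
--     freq = {}
--     for c in line:
--        freq[c] = line.count(c)
--
--     counts = freq.values()
--     two = 1 if 2 in counts else 0
--     three = 1 if 3 in counts else 0
--
--     return two, three
-- ===== SOURCE B (Python) =====
-- def check(line):
--     lens = set()
--     run = 0
--     prev = None
--     for c in sorted(line):
--         if run > 0 and c == prev:
--             run += 1
--         else:
--             if run > 0:
--                 lens.add(run)
--             run = 1
--             prev = c
--     if run > 0:
--         lens.add(run)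
--     return (1 if 2 in lens else 0, 1 if 3 in lens else 0)
-- ===== Notes on version B (the rewrite author's own statement) =====
-- stated objective: faster
-- what changed: Replaces the per-character dict of full-string .count() scans with a single sort followed by one consecutive-run scan that collects run lengths into a set.
import Mathlib
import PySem

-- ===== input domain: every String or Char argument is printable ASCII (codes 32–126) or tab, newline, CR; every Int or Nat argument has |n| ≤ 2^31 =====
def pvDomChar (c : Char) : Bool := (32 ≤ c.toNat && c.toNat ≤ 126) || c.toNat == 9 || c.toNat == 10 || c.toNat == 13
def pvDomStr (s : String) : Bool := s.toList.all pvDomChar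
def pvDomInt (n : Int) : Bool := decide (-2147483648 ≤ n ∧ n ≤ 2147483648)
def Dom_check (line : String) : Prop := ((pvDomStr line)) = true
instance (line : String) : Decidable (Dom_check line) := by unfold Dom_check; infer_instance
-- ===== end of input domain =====

-- B replaces A's per-character full-string count() scans by sort + one consecutive-run scan (objective: faster).

-- ===== PORT A =====
def check (line : String) : Int × Int :=
  -- freq = {}; for c in line: freq[c] = line.count(c)
  -- (line.count(c) with c a single character: substring count of the one-char needle, PySem.Chars.count)
  let freq : PySem.Dict Char Int :=
    line.toList.foldl
      (fun d c => d.insert c ((PySem.Chars.count line.toList [c] : Nat) : Int))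
      PySem.Dict.empty
  let counts := freq.values
  let two : Int := if (2 : Int) ∈ counts then 1 else 0
  let three : Int := if (3 : Int) ∈ counts then 1 else 0
  (two, three)

-- ===== PORT B =====
def check_alt (line : String) : Int × Int :=
  -- lens = set(); run = 0; prev = None
  -- for c in sorted(line): if run > 0 and c == prev: run += 1
  --                        else: (if run > 0: lens.add(run)); run = 1; prev = c
  -- if run > 0: lens.add(run)
  let st :=
    (PySem.List.sorted line.toList (fun x => x) false).foldl
      (fun (st : PySem.Set Int × Int × Option Char) c =>
        if 0 < st.2.1 ∧ st.2.2 = some c then (st.1, st.2.1 + 1, st.2.2)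
        else ((if 0 < st.2.1 then PySem.Set.add st.1 st.2.1 else st.1), 1, some c))
      (PySem.Set.empty, 0, none)
  let lens : PySem.Set Int := if 0 < st.2.1 then PySem.Set.add st.1 st.2.1 else st.1
  ((if (2 : Int) ∈ lens then 1 else 0), (if (3 : Int) ∈ lens then 1 else 0))

-- ===== PRECONDITION & SPEC =====
def Spec_check (line : String) (out : Int × Int) : Prop := out = check_alt line
instance (line : String) (out : Int × Int) : Decidable (Spec_check line out) := by unfold Spec_check; infer_instance

-- ===== CLAIM (what is proved, stated in full; the proofs are below) =====
def Claim_equal_check : Prop := ∀ (line : String), Dom_check line → Spec_check line (check line)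

-- ===== LEMMAS AND PROOFS =====

-- Python str.count of a ONE-character needle is the character count.
theorem chars_count_go_single (c : Char) :
    ∀ (l : List Char) (fuel acc : Nat), l.length ≤ fuel →
      PySem.Chars.count.go [c] fuel l acc = acc + l.count c := by
  intro l
  induction l with
  | nil => intro fuel acc _; cases fuel <;> simp [PySem.Chars.count.go]
  | cons d t ih =>
    intro fuel acc hle
    cases fuel with
    | zero => simp at hle
    | succ n =>
      simp only [PySem.Chars.count.go]
      by_cases h : d = c
      · subst h
        rw [if_pos (by simp [List.isPrefixOf])]
        simp only [List.length_cons, List.length_nil, List.drop_succ_cons, List.drop_zero]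
        rw [ih n (acc + 1) (by simpa using hle)]
        simp
        omega
      · have hpf : ([c].isPrefixOf (d :: t)) = false := by
          simp [List.isPrefixOf]
          exact fun hh => absurd hh.symm h
        rw [hpf]
        simp only [Bool.false_eq_true, if_false]
        rw [ih n acc (by simpa using hle)]
        simp [h]

theorem chars_count_single (l : List Char) (c : Char) :
    PySem.Chars.count l [c] = l.count c := by
  simp only [PySem.Chars.count]
  rw [if_neg (by simp)]
  simpa using chars_count_go_single c l l.length 0 le_rfl

-- A's dict loop: a value is among the final values iff it is f of some processed character,
-- provided every already-stored value is f of its key.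
theorem values_foldl_insert (f : Char → Int) :
    ∀ (l : List Char) (d : PySem.Dict Char Int),
      (∀ p ∈ d.items, p.2 = f p.1) →
      ∀ v, (v ∈ (l.foldl (fun d c => d.insert c (f c)) d).values ↔
              v ∈ d.values ∨ ∃ c ∈ l, f c = v) := by
  intro l
  induction l with
  | nil => intro d _ v; simp
  | cons c t ih =>
    intro d hd v
    have hd' : ∀ p ∈ (d.insert c (f c)).items, p.2 = f p.1 := by
      intro p hp
      simp only [PySem.Dict.insert] at hp
      by_cases hc : d.contains c = true
      · rw [if_pos hc] at hp
        simp only [List.mem_map] at hp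
        obtain ⟨q, hq, hpq⟩ := hp
        by_cases hqc : (q.1 == c) = true
        · rw [if_pos hqc] at hpq; subst hpq; rfl
        · rw [if_neg hqc] at hpq; subst hpq; exact hd q hq
      · rw [if_neg hc] at hp
        rcases List.mem_append.mp hp with hmem | hmem
        · exact hd _ hmem
        · simp at hmem; subst hmem; rfl
    have hins : ∀ w, w ∈ (d.insert c (f c)).values ↔ w ∈ d.values ∨ w = f c := by
      intro w
      simp only [PySem.Dict.insert, PySem.Dict.values]
      by_cases hc : d.contains c = true
      · rw [if_pos hc]
        simp only [List.map_map, List.mem_map, Function.comp]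
        constructor
        · rintro ⟨q, hq, hw⟩
          by_cases hqc : (q.1 == c) = true
          · rw [if_pos hqc] at hw
            right; exact hw.symm
          · rw [if_neg hqc] at hw
            left; exact ⟨q, hq, hw⟩
        · rintro (⟨q, hq, hw⟩ | hw)
          · refine ⟨q, hq, ?_⟩
            by_cases hqc : (q.1 == c) = true
            · rw [if_pos hqc]
              have hq1 : q.1 = c := beq_iff_eq.mp hqc
              simp only [← hw, hd q hq, hq1]
            · rw [if_neg hqc]; exact hw
          · simp only [PySem.Dict.contains, List.any_eq_true] at hc
            obtain ⟨q, hq, hqc⟩ := hc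
            refine ⟨q, hq, ?_⟩
            rw [if_pos hqc, hw]
      · rw [if_neg hc]
        simp
    rw [List.foldl_cons, ih _ hd' v, hins v]
    constructor
    · rintro ((h | h) | ⟨x, hx, hfx⟩)
      · exact Or.inl h
      · exact Or.inr ⟨c, by simp, h.symm⟩
      · exact Or.inr ⟨x, by simp [hx], hfx⟩
    · rintro (h | ⟨x, hx, hfx⟩)
      · exact Or.inl (Or.inl h)
      · rcases List.mem_cons.mp hx with h | h
        · subst h; exact Or.inl (Or.inr hfx.symm)
        · exact Or.inr ⟨x, h, hfx⟩

-- A-side characterisation: the dict's values are exactly the character counts of line.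
theorem mem_countsA (l : List Char) (k : Int) :
    (k ∈ (l.foldl (fun d c => d.insert c ((PySem.Chars.count l [c] : Nat) : Int))
        (PySem.Dict.empty : PySem.Dict Char Int)).values) ↔
      ∃ x ∈ l, (l.count x : Int) = k := by
  rw [values_foldl_insert (fun c => ((PySem.Chars.count l [c] : Nat) : Int)) l
      PySem.Dict.empty (by simp [PySem.Dict.empty]) k]
  simp [PySem.Dict.values, PySem.Dict.empty, chars_count_single]

-- ----- B side -----

-- B's loop body and final flush, named for the proofs (definitionally the lambdas of check_alt).
def stepB (st : PySem.Set Int × Int × Option Char) (c : Char) :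
    PySem.Set Int × Int × Option Char :=
  if 0 < st.2.1 ∧ st.2.2 = some c then (st.1, st.2.1 + 1, st.2.2)
  else ((if 0 < st.2.1 then PySem.Set.add st.1 st.2.1 else st.1), 1, some c)

def finalizeB (st : PySem.Set Int × Int × Option Char) : PySem.Set Int :=
  if 0 < st.2.1 then PySem.Set.add st.1 st.2.1 else st.1

-- The run lengths B's scan emits, as a recursion (proof helper).
def runsGo (c : Char) (k : Int) : List Char → List Int
  | [] => [k]
  | d :: ds => if d = c then runsGo c (k + 1) ds else k :: runsGo d 1 ds

theorem foldl_stepB_eq_runsGo :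
    ∀ (l : List Char) (lens : PySem.Set Int) (run : Int) (c : Char), 0 < run →
      finalizeB (l.foldl stepB (lens, run, some c)) =
        (runsGo c run l).foldl PySem.Set.add lens := by
  intro l
  induction l with
  | nil => intro lens run c h; simp [finalizeB, runsGo, if_pos h]
  | cons d ds ih =>
    intro lens run c h
    by_cases hdc : d = c
    · subst hdc
      rw [List.foldl_cons]
      have hst : stepB (lens, run, some d) d = (lens, run + 1, some d) := by
        simp [stepB, h]
      rw [hst, ih lens (run + 1) d (by omega), runsGo, if_pos rfl]
    · rw [List.foldl_cons]
      have hst : stepB (lens, run, some c) d = (PySem.Set.add lens run, 1, some d) := by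
        simp only [stepB]
        rw [if_neg (by rintro ⟨-, hh⟩; exact hdc (Option.some_inj.mp hh).symm), if_pos h]
      rw [hst, ih _ 1 d (by omega), runsGo, if_neg hdc, List.foldl_cons]

theorem mem_foldl_set_add (rl : List Int) :
    ∀ (s : PySem.Set Int) (v : Int), v ∈ rl.foldl PySem.Set.add s ↔ v ∈ s ∨ v ∈ rl := by
  induction rl with
  | nil => intro s v; simp
  | cons r rs ih =>
    intro s v
    rw [List.foldl_cons, ih, PySem.Set.mem_add]
    simp [List.mem_cons]
    tauto

theorem mem_runsGo :
    ∀ (l : List Char) (c : Char) (run k : Int),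
      l.Pairwise (· ≤ ·) → (∀ x ∈ l, c ≤ x) →
      (k ∈ runsGo c run l ↔
        k = run + (l.count c : Int) ∨ ∃ x ∈ l, x ≠ c ∧ (l.count x : Int) = k) := by
  intro l
  induction l with
  | nil => intro c run k _ _; simp [runsGo]
  | cons d ds ih =>
    intro c run k hp hle
    have hp' : ds.Pairwise (· ≤ ·) := hp.of_cons
    have hdle : ∀ x ∈ ds, d ≤ x := (List.pairwise_cons.mp hp).1
    by_cases hdc : d = c
    · subst hdc
      rw [runsGo, if_pos rfl, ih d (run + 1) k hp' hdle]
      constructor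
      · rintro (h | ⟨x, hx, hxd, hxc⟩)
        · left; rw [h]; simp; ring
        · right
          exact ⟨x, by simp [hx], hxd, by rw [← hxc]; simp [Ne.symm hxd]⟩
      · rintro (h | ⟨x, hx, hxd, hxc⟩)
        · left; rw [h]; simp; ring
        · right
          have hx' : x ∈ ds := by
            rcases List.mem_cons.mp hx with hh | hh
            · exact absurd hh hxd
            · exact hh
          exact ⟨x, hx', hxd, by rw [← hxc]; simp [Ne.symm hxd]⟩
    · have hcd : c < d := lt_of_le_of_ne (hle d (by simp)) (Ne.symm hdc)
      have hclt : ∀ x ∈ d :: ds, c < x := by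
        intro x hx
        rcases List.mem_cons.mp hx with hh | hh
        · exact hh ▸ hcd
        · exact lt_of_lt_of_le hcd (hdle x hh)
      have hcnot : c ∉ d :: ds := fun hmem => lt_irrefl c (hclt c hmem)
      have hc0 : (d :: ds).count c = 0 := List.count_eq_zero.mpr hcnot
      rw [runsGo, if_neg hdc]
      rw [List.mem_cons, ih d 1 k hp' hdle]
      constructor
      · rintro (h | h | ⟨x, hx, hxd, hxc⟩)
        · left; rw [h, hc0]; simp
        · right
          exact ⟨d, by simp, fun hh => hdc (hh.symm ▸ rfl) ,
            by rw [h]; simp; ring⟩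
        · right
          refine ⟨x, by simp [hx], ?_, ?_⟩
          · exact fun hh => lt_irrefl c (hh ▸ hclt x (by simp [hx]))
          · rw [← hxc]; simp [Ne.symm hxd]
      · rintro (h | ⟨x, hx, _, hxc⟩)
        · left; rw [h, hc0]; simp
        · rcases List.mem_cons.mp hx with hh | hh
          · subst hh
            right; left
            rw [← hxc]; simp; ring
          · by_cases hxd : x = d
            · subst hxd
              right; left
              rw [← hxc]; simp; ring
            · right; right
              exact ⟨x, hh, hxd, by rw [← hxc]; simp [Ne.symm hxd]⟩

theorem mem_lensB_aux (s : List Char) (hp : s.Pairwise (· ≤ ·)) (k : Int) :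
    (k ∈ finalizeB (s.foldl stepB (PySem.Set.empty, 0, none))) ↔
      ∃ x ∈ s, (s.count x : Int) = k := by
  cases s with
  | nil => simp [finalizeB, PySem.Set.empty]
  | cons c cs =>
    have hp' : cs.Pairwise (· ≤ ·) := hp.of_cons
    have hle : ∀ x ∈ cs, c ≤ x := (List.pairwise_cons.mp hp).1
    rw [List.foldl_cons]
    have hst : stepB (PySem.Set.empty, 0, none) c = (PySem.Set.empty, 1, some c) := by
      simp [stepB]
    rw [hst, foldl_stepB_eq_runsGo cs PySem.Set.empty 1 c one_pos,
        mem_foldl_set_add, mem_runsGo cs c 1 k hp' hle]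
    simp only [PySem.Set.empty, List.not_mem_nil, false_or]
    constructor
    · rintro (h | ⟨x, hx, hxc, hxk⟩)
      · exact ⟨c, by simp, by rw [h]; simp; ring⟩
      · exact ⟨x, by simp [hx], by rw [← hxk]; simp [Ne.symm hxc]⟩
    · rintro ⟨x, hx, hxk⟩
      rcases List.mem_cons.mp hx with hh | hh
      · subst hh
        left; rw [← hxk]; simp; ring
      · by_cases hxc : x = c
        · subst hxc
          left; rw [← hxk]; simp; ring
        · right
          exact ⟨x, hh, hxc, by rw [← hxk]; simp [Ne.symm hxc]⟩

theorem mem_lensB (l : List Char) (k : Int) :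
    (k ∈ finalizeB ((PySem.List.sorted l (fun x => x) false).foldl stepB
        (PySem.Set.empty, 0, none))) ↔ ∃ x ∈ l, (l.count x : Int) = k := by
  have hperm := PySem.List.sorted_perm l (fun x => x) false
  have hpair := PySem.List.sorted_pairwise l (fun x => x)
  rw [mem_lensB_aux _ hpair k]
  exact exists_congr fun x => by rw [hperm.mem_iff, hperm.count_eq]

-- ===== VERDICT (by name: the statement is the Claim_ definition above) =====
theorem check_spec : Claim_equal_check := by
  intro line _
  show check line = check_alt line
  have eA : check line =
      ((if (2 : Int) ∈ (line.toList.foldl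
          (fun d c => d.insert c ((PySem.Chars.count line.toList [c] : Nat) : Int))
          (PySem.Dict.empty : PySem.Dict Char Int)).values then 1 else 0),
       (if (3 : Int) ∈ (line.toList.foldl
          (fun d c => d.insert c ((PySem.Chars.count line.toList [c] : Nat) : Int))
          (PySem.Dict.empty : PySem.Dict Char Int)).values then 1 else 0)) := rfl
  have eB : check_alt line =
      ((if (2 : Int) ∈ finalizeB ((PySem.List.sorted line.toList (fun x => x) false).foldl
          stepB (PySem.Set.empty, 0, none)) then 1 else 0),
       (if (3 : Int) ∈ finalizeB ((PySem.List.sorted line.toList (fun x => x) false).foldl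
          stepB (PySem.Set.empty, 0, none)) then 1 else 0)) := rfl
  rw [eA, eB,
      if_congr ((mem_countsA line.toList 2).trans (mem_lensB line.toList 2).symm) rfl rfl,
      if_congr ((mem_countsA line.toList 3).trans (mem_lensB line.toList 3).symm) rfl rfl]
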